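-- pv_equiv track=rewrite | github.com/jameschengpeng/Frequent-pattern-mining-program | pattern_mining.py | count_pattern_occurance
-- ===== SOURCE A (Python) =====
-- def count_pattern_occurance(pattern, transaction_DB):
--     set_pattern = set(pattern)
--     counter = 0
--     for key in transaction_DB.keys():
--         set_transaction = set(transaction_DB[key])
--         if len(set_pattern - set_transaction) == 0:
--             counter += 1
--     return counter
-- ===== SOURCE B (Python) =====
-- def count_pattern_occurance(pattern, transaction_DB):
--     # Inverted index: item -> set of transaction ids containing it.
--     index = {}
--     for tid in transaction_DB:
--         for item in transaction_DB[tid]: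
--             index.setdefault(item, set()).add(tid)
--     pats = list(dict.fromkeys(pattern))
--     if not pats:
--         return len(transaction_DB)
--     tids = index.get(pats[0], set())
--     for q in pats[1:]:
--         tids = tids & index.get(q, set())
--     return len(tids)
-- ===== Notes on version B (the rewrite author's own statement) =====
-- stated objective: faster
-- what changed: B builds an inverted index (item -> set of transaction ids) in one pass and computes the support as the size of the intersection of the pattern items' tid-sets, instead of materialising a set per transaction and subset-testing each one against the pattern.
import Mathlib
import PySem

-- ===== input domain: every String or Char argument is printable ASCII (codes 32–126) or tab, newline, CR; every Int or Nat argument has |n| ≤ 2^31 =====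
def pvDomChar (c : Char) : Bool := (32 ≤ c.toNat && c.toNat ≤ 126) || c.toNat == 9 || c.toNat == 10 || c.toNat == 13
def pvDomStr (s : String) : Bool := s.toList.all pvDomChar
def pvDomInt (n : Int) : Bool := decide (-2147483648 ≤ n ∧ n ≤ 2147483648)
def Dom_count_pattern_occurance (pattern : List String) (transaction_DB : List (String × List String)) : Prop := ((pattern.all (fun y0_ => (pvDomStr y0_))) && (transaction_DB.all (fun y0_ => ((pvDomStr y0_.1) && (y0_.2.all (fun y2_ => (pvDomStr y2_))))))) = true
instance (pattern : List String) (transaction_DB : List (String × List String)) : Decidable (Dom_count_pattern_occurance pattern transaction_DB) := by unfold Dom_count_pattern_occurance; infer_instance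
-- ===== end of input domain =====

-- B replaces the per-transaction subset test by an inverted index (item -> tid set) and
-- intersects the pattern items' tid-sets; equivalence of both counts is proved below.

-- ===== PORT A =====
-- for key in transaction_DB.keys(): set_transaction = set(transaction_DB[key]); if len(set_pattern - set_transaction) == 0: counter += 1
def count_pattern_occurance (pattern : List String) (transaction_DB : List (String × List String)) : Int :=
  let db := PySem.Dict.ofList transaction_DB
  let set_pattern := PySem.Set.ofList pattern
  db.keys.foldl (fun counter key =>
    let set_transaction := PySem.Set.ofList (db.getD key [])
    if PySem.Set.len (PySem.Set.diff set_pattern set_transaction) = 0 then counter + 1 else counter) 0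

-- ===== PORT B =====
-- for tid in transaction_DB: for item in transaction_DB[tid]: index.setdefault(item, set()).add(tid)
-- (iterating the dict's (tid, transaction) items; exact since dict keys are unique)
def pvBuildIndex (items : List (String × List String)) : PySem.Dict String (PySem.Set String) :=
  items.foldl (fun index kv =>
    kv.2.foldl (fun index item =>
      index.modify item PySem.Set.empty (fun s => PySem.Set.add s kv.1)) index) PySem.Dict.empty

def count_pattern_occurance_alt (pattern : List String) (transaction_DB : List (String × List String)) : Int :=
  let db := PySem.Dict.ofList transaction_DB
  let index := pvBuildIndex db.items
  match PySem.List.dedup pattern with          -- pats = list(dict.fromkeys(pattern))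
  | [] => (db.size : Int)
  | p :: ps =>
    PySem.Set.len (ps.foldl (fun tids q => PySem.Set.inter tids (index.getD q PySem.Set.empty))
      (index.getD p PySem.Set.empty))

-- ===== PRECONDITION & SPEC =====
def Spec_count_pattern_occurance (pattern : List String) (transaction_DB : List (String × List String)) (out : Int) : Prop := out = count_pattern_occurance_alt pattern transaction_DB
instance (pattern : List String) (transaction_DB : List (String × List String)) (out : Int) : Decidable (Spec_count_pattern_occurance pattern transaction_DB out) := by unfold Spec_count_pattern_occurance; infer_instance

-- ===== CLAIM (what is proved, stated in full; the proofs are below) =====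
def Claim_equal_count_pattern_occurance : Prop := ∀ (pattern : List String) (transaction_DB : List (String × List String)), Dom_count_pattern_occurance pattern transaction_DB → Spec_count_pattern_occurance pattern transaction_DB (count_pattern_occurance pattern transaction_DB)

-- ===== LEMMAS AND PROOFS =====

-- inner loop of the index builder
theorem pv_inner_getD (items : List String) (tid : String)
    (idx : PySem.Dict String (PySem.Set String)) (q : String) :
    (items.foldl (fun index item =>
        index.modify item PySem.Set.empty (fun s => PySem.Set.add s tid)) idx).getD q PySem.Set.empty =
      if items.contains q then PySem.Set.add (idx.getD q PySem.Set.empty) tid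
      else idx.getD q PySem.Set.empty := by
  induction items generalizing idx with
  | nil => simp
  | cons a items ih =>
    simp only [List.foldl_cons, ih, PySem.Dict.getD_modify]
    by_cases hq : q = a
    · subst hq
      simp
    · have : (a == q) = false := by simp [Ne.symm hq]
      simp [hq]

-- outer loop of the index builder, per key q
theorem pv_outer_getD (L : List (String × List String))
    (idx : PySem.Dict String (PySem.Set String)) (q : String) :
    (L.foldl (fun index kv =>
        kv.2.foldl (fun index item =>
          index.modify item PySem.Set.empty (fun s => PySem.Set.add s kv.1)) index) idx).getD q
        PySem.Set.empty =
      L.foldl (fun s kv => if kv.2.contains q then PySem.Set.add s kv.1 else s)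
        (idx.getD q PySem.Set.empty) := by
  induction L generalizing idx with
  | nil => rfl
  | cons kv L ih =>
    simp only [List.foldl_cons, ih, pv_inner_getD]

-- folding fresh distinct additions appends the filtered key list
theorem pv_fresh_fold (L : List (String × List String)) (q : String) (s : List String)
    (hf : ∀ kv ∈ L, kv.1 ∉ s) (hnd : (L.map Prod.fst).Nodup) :
    L.foldl (fun s kv => if kv.2.contains q then PySem.Set.add s kv.1 else s) s =
      s ++ (L.filter (fun kv => kv.2.contains q)).map Prod.fst := by
  induction L generalizing s with
  | nil => simp
  | cons kv L ih =>
    simp only [List.map_cons, List.nodup_cons] at hnd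
    by_cases hc : kv.2.contains q
    · have hadd : PySem.Set.add s kv.1 = s ++ [kv.1] := by
        have hns : kv.1 ∉ s := hf kv List.mem_cons_self
        simp [PySem.Set.add, PySem.Set.contains, hns]
      rw [List.foldl_cons, if_pos hc, hadd,
        ih (s ++ [kv.1]) (by
          intro kv' h' hmem
          rcases List.mem_append.mp hmem with h | h
          · exact hf kv' (by simp [h']) h
          · have hm : kv'.1 ∈ List.map Prod.fst L := List.mem_map.mpr ⟨kv', h', rfl⟩
            simp only [List.mem_singleton] at h
            rw [h] at hm
            exact hnd.1 hm)
        hnd.2]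
      have hc' : decide (q ∈ kv.2) = true := by simpa using hc
      simp [hc']
    · rw [List.foldl_cons, if_neg hc, ih s (fun kv' h' => hf kv' (by simp [h'])) hnd.2]
      have hc' : decide (q ∈ kv.2) = false := by simpa using hc
      simp [hc']

-- the tid-set of q is the filtered key list, for nodup key lists
theorem pv_index_getD (L : List (String × List String)) (q : String)
    (hnd : (L.map Prod.fst).Nodup) :
    (pvBuildIndex L).getD q PySem.Set.empty =
      (L.filter (fun kv => kv.2.contains q)).map Prod.fst := by
  rw [pvBuildIndex, pv_outer_getD]
  simpa using pv_fresh_fold L q [] (by simp) hnd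

-- contains on a filtered key list, for nodup key lists
theorem pv_mem_T (L : List (String × List String)) (hnd : (L.map Prod.fst).Nodup)
    (c : String × List String → Bool) (kv : String × List String) (hkv : kv ∈ L) :
    ((L.filter c).map Prod.fst).contains kv.1 = c kv := by
  cases hc : c kv
  · simp only [List.contains_eq_mem, decide_eq_false_iff_not, List.mem_map]
    rintro ⟨kv', hkv', hfst⟩
    have hkv'L : kv' ∈ L := List.mem_of_mem_filter hkv'
    have heq : kv' = kv := List.inj_on_of_nodup_map hnd hkv'L hkv hfst
    subst heq
    have := List.of_mem_filter hkv'
    rw [hc] at this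
    simp at this
  · simp only [List.contains_eq_mem, decide_eq_true_eq, List.mem_map]
    exact ⟨kv, List.mem_filter.mpr ⟨hkv, hc⟩, rfl⟩

-- one intersection step
theorem pv_inter_step (L : List (String × List String)) (hnd : (L.map Prod.fst).Nodup)
    (P : String × List String → Bool) (q : String) :
    PySem.Set.inter ((L.filter P).map Prod.fst) ((L.filter (fun kv => kv.2.contains q)).map Prod.fst) =
      (L.filter (fun kv => P kv && kv.2.contains q)).map Prod.fst := by
  show List.filter _ _ = _
  rw [List.filter_map, List.filter_filter]
  congr 1
  apply List.filter_congr
  intro kv hkv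
  have hm := pv_mem_T L hnd (fun kv => kv.2.contains q) kv hkv
  simp only [PySem.Set.contains] at *
  simp only [Function.comp_apply]
  rw [hm, Bool.and_comm]

-- intersection fold characterisation
theorem pv_inter_fold_gen (L : List (String × List String)) (hnd : (L.map Prod.fst).Nodup)
    (ps : List String) (P : String × List String → Bool) :
    ps.foldl (fun tids q => PySem.Set.inter tids ((pvBuildIndex L).getD q PySem.Set.empty))
        ((L.filter P).map Prod.fst) =
      (L.filter (fun kv => P kv && ps.all (fun x => kv.2.contains x))).map Prod.fst := by
  induction ps generalizing P with
  | nil => simp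
  | cons q ps ih =>
    rw [List.foldl_cons, pv_index_getD L q hnd, pv_inter_step L hnd P q, ih]
    apply congrArg (List.map Prod.fst)
    apply List.filter_congr
    intro kv _
    simp [Bool.and_assoc]

theorem pv_inter_fold (L : List (String × List String)) (hnd : (L.map Prod.fst).Nodup)
    (p : String) (ps : List String) :
    ps.foldl (fun tids q => PySem.Set.inter tids ((pvBuildIndex L).getD q PySem.Set.empty))
        ((pvBuildIndex L).getD p PySem.Set.empty) =
      (L.filter (fun kv => (p :: ps).all (fun x => kv.2.contains x))).map Prod.fst := by
  rw [pv_index_getD L p hnd, pv_inter_fold_gen L hnd ps]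
  apply congrArg (List.map Prod.fst)
  apply List.filter_congr
  intro kv _
  simp

-- counting fold, Prop condition
theorem pv_foldl_countP {α : Type} (P : α → Prop) [DecidablePred P] (l : List α) (c : Int) :
    l.foldl (fun c a => if P a then c + 1 else c) c = c + (l.filter (fun a => decide (P a))).length := by
  induction l generalizing c with
  | nil => simp
  | cons a l ih =>
    by_cases h : P a <;> simp [h, ih] <;> omega

-- membership test of a pattern set against a transaction, A's condition
theorem pv_cond_eq (pattern : List String) (txn : List String) :
    decide (PySem.Set.len (PySem.Set.diff (PySem.Set.ofList pattern) (PySem.Set.ofList txn)) = 0) =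
      ((PySem.List.dedup pattern).all (fun x => txn.contains x)) := by
  simp only [PySem.Set.len, PySem.Set.diff, PySem.List.dedup_eq_ofList]
  cases hall : (PySem.Set.ofList pattern).all (fun x => txn.contains x)
  · rw [List.all_eq_false] at hall
    obtain ⟨x, hx, hnx⟩ := hall
    simp only [decide_eq_false_iff_not]
    intro hlen
    rw [Int.natCast_eq_zero, List.length_eq_zero_iff, List.filter_eq_nil_iff] at hlen
    have h1 := hlen x hx
    simp only [PySem.Set.contains, List.contains_eq_mem, PySem.Set.mem_ofList] at h1
    simp only [List.contains_eq_mem] at hnx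
    simp at h1 hnx
    exact hnx h1
  · simp only [List.all_eq_true] at hall
    simp
    intro a ha
    have h2 := hall a (by rw [PySem.Set.mem_ofList]; exact ha)
    simpa using h2

-- ===== VERDICT (by name: the statement is the Claim_ definition above) =====
theorem count_pattern_occurance_spec : Claim_equal_count_pattern_occurance := by
  intro pattern transaction_DB _
  unfold Spec_count_pattern_occurance count_pattern_occurance count_pattern_occurance_alt
  have hnd : ((PySem.Dict.ofList transaction_DB).items.map Prod.fst).Nodup :=
    PySem.Dict.nodup_keys_ofList transaction_DB
  set db := PySem.Dict.ofList transaction_DB with hdb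
  have hitems : db.items = db.keys.map (fun k => (k, db.getD k ([] : List String))) :=
    PySem.Dict.items_eq_map_keys db hnd ([] : List String)
  simp only [pv_foldl_countP]
  split
  next hded =>
    have hpat : pattern = [] := by
      cases hp : pattern with
      | nil => rfl
      | cons a t =>
        exfalso
        have ha : a ∈ PySem.List.dedup pattern := by
          rw [PySem.List.mem_dedup, hp]
          simp
        rw [hded] at ha
        simp at ha
    subst hpat
    simp [show PySem.Set.ofList ([] : List String) = [] from rfl, PySem.Set.diff,
      PySem.Set.len, PySem.Dict.size, PySem.Dict.keys]
  next p ps hded =>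
    rw [pv_inter_fold db.items hnd p ps, ← hded, PySem.Set.len]
    conv_rhs => rw [hitems]
    rw [List.filter_map, List.map_map, List.length_map]
    simp only [zero_add, Nat.cast_inj]
    apply congrArg List.length
    apply List.filter_congr
    intro k _
    simpa using pv_cond_eq pattern (db.getD k [])
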